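-- pv_equiv track=rewrite | github.com/jplayle/AIFX | code/archive/Forex_TITAN.py | combo_grid
-- ===== SOURCE A (Python) =====
-- def combo_grid(MARKET_epics):
--     combos = []
--     for epic1 in MARKET_epics:
--         for epic2 in MARKET_epics:
--             if epic1 == epic2:
--                 continue
--             else:
--                 combo = [epic1, epic2]
--                 if combo not in combos and combo[::-1] not in combos:
--                     combos.append(combo)
--     return combos
-- ===== SOURCE B (Python) =====
-- def combo_grid(MARKET_epics):
--     # Dedup first (first-occurrence order, list membership so unhashable
--     # elements behave like A's '==' checks), then one triangular recursion.
--     distinct = []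
--     for e in MARKET_epics:
--         if e not in distinct:
--             distinct.append(e)
--     return _pairs(distinct)
--
--
-- def _pairs(vals):
--     if not vals:
--         return []
--     head, tail = vals[0], vals[1:]
--     return [[head, b] for b in tail] + _pairs(tail)
-- ===== Notes on version B (the rewrite author's own statement) =====
-- stated objective: faster
-- what changed: A scans all n^2 ordered pairs and does a membership test of each candidate pair (and its reverse) against the growing result list; B first builds the list of distinct values in first-occurrence order and then emits the triangular pairs of that list by a single recursion, with no membership checks on the result.
import Mathlib
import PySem

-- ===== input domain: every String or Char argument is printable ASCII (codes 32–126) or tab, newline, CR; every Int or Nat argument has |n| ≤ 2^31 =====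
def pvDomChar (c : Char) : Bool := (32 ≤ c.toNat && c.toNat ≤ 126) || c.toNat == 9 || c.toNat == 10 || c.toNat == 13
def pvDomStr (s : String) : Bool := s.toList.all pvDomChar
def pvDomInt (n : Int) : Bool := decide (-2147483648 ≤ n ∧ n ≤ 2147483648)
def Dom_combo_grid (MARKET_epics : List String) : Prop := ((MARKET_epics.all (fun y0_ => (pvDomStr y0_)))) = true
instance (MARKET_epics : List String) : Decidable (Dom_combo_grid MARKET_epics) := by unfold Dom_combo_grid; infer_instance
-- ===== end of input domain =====

-- B replaces A's quadratic pass with duplicate/membership checks by dedup-first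
-- plus one triangular recursion over the distinct values (objective: faster).

-- ===== PORT A =====
-- inner loop body: 'if epic1 == epic2: continue else: …'; combo[::-1] on the
-- two-element list combo is its reverse (PySem.List.slice?_none_none_neg_one).
def comboInnerStep (epic1 : String) (combos : List (List String)) (epic2 : String) :
    List (List String) :=
  if epic1 = epic2 then combos
  else
    let combo := [epic1, epic2]
    if combo ∉ combos ∧ combo.reverse ∉ combos then combos ++ [combo] else combos

def combo_grid (MARKET_epics : List String) : List (List String) :=
  MARKET_epics.foldl
    (fun combos epic1 => MARKET_epics.foldl (comboInnerStep epic1) combos)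
    []

-- ===== PORT B =====
-- 'if e not in distinct: distinct.append(e)'
def distinctStep (distinct : List String) (e : String) : List String :=
  if e ∈ distinct then distinct else distinct ++ [e]

-- pairs(vals): head = vals[0], tail = vals[1:]; comprehension → map
def pairsB : List String → List (List String)
  | [] => []
  | head :: tail => (tail.map (fun b => [head, b])) ++ pairsB tail

def combo_grid_alt (MARKET_epics : List String) : List (List String) :=
  pairsB (MARKET_epics.foldl distinctStep [])

-- ===== PRECONDITION & SPEC =====
def Spec_combo_grid (MARKET_epics : List String) (out : List (List String)) : Prop := out = combo_grid_alt MARKET_epics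
instance (MARKET_epics : List String) (out : List (List String)) : Decidable (Spec_combo_grid MARKET_epics out) := by unfold Spec_combo_grid; infer_instance

-- ===== CLAIM (what is proved, stated in full; the proofs are below) =====
def Claim_equal_combo_grid : Prop := ∀ (MARKET_epics : List String), Dom_combo_grid MARKET_epics → Spec_combo_grid MARKET_epics (combo_grid MARKET_epics)

-- ===== LEMMAS AND PROOFS =====

/-- Ordered dedup with an explicit `seen` accumulator: the distinct values of
`M` not in `seen`, in first-occurrence order. -/
def dd (seen : List String) : List String → List String
  | [] => []
  | x :: M => if x ∈ seen then dd seen M else x :: dd (seen ++ [x]) M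

theorem mem_dd {x : String} : ∀ (M seen : List String),
    x ∈ dd seen M ↔ x ∈ M ∧ x ∉ seen := by
  intro M
  induction M with
  | nil => intro seen; simp [dd]
  | cons y M ih =>
    intro seen
    by_cases hy : y ∈ seen
    · simp only [dd, if_pos hy, ih, List.mem_cons]
      constructor
      · rintro ⟨h1, h2⟩; exact ⟨Or.inr h1, h2⟩
      · rintro ⟨h1 | h1, h2⟩
        · subst h1; exact absurd hy h2
        · exact ⟨h1, h2⟩
    · simp only [dd, if_neg hy, List.mem_cons, ih, List.mem_append,
        List.mem_singleton]
      constructor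
      · rintro (h | ⟨h1, h2⟩)
        · subst h; exact ⟨Or.inl rfl, hy⟩
        · exact ⟨Or.inr h1, fun hc => h2 (Or.inl hc)⟩
      · rintro ⟨h1 | h1, h2⟩
        · exact Or.inl h1
        · by_cases hxy : x = y
          · exact Or.inl hxy
          · exact Or.inr ⟨h1, by simp [h2, hxy]⟩

theorem foldl_distinctStep_eq_dd : ∀ (M d : List String),
    M.foldl distinctStep d = d ++ dd d M := by
  intro M
  induction M with
  | nil => intro d; simp [dd]
  | cons x M ih =>
    intro d
    by_cases hx : x ∈ d
    · simp [List.foldl_cons, distinctStep, if_pos hx, dd, ih]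
    · simp [List.foldl_cons, distinctStep, if_neg hx, dd, ih]

/-- Peeling the head of a dedup: if `dd pre L = t :: ts` then the remaining
distinct values are `dd (pre ++ [t]) L`. -/
theorem dd_cons : ∀ (L pre : List String) {t ts},
    dd pre L = t :: ts → dd (pre ++ [t]) L = ts := by
  intro L
  induction L with
  | nil => intro pre t ts h; simp [dd] at h
  | cons x M ih =>
    intro pre t ts h
    by_cases hx : x ∈ pre
    · rw [dd, if_pos hx] at h
      rw [dd, if_pos (List.mem_append_left _ hx)]
      exact ih _ h
    · rw [dd, if_neg hx] at h
      obtain ⟨rfl, hts⟩ : x = t ∧ dd (pre ++ [x]) M = ts := by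
        exact ⟨(List.cons.injEq _ _ _ _ ▸ h).1, (List.cons.injEq _ _ _ _ ▸ h).2⟩
      rw [dd, if_pos (by simp)]
      exact hts

/-- The blocks A has built after having processed the distinct values `ts`
(with the earlier distinct values `pre` already paired off): for each `t` in
`ts`, in order, the pairs `[t, b]` for every distinct value `b` of `L` that
comes strictly after `t`. -/
def pbAux (L : List String) (pre : List String) : List String → List (List String)
  | [] => []
  | t :: ts => (dd (pre ++ [t]) L).map (fun b => [t, b]) ++ pbAux L (pre ++ [t]) ts

theorem mem_pbAux_fst {L : List String} : ∀ (ts pre : List String) {p},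
    p ∈ pbAux L pre ts → ∃ a b, p = [a, b] ∧ a ∈ ts := by
  intro ts
  induction ts with
  | nil => intro pre p h; simp [pbAux] at h
  | cons t ts ih =>
    intro pre p h
    rw [pbAux] at h
    rcases List.mem_append.mp h with h | h
    · obtain ⟨b, _, rfl⟩ := List.mem_map.mp h
      exact ⟨t, b, rfl, List.mem_cons_self ..⟩
    · obtain ⟨a, b, rfl, ha⟩ := ih _ h
      exact ⟨a, b, rfl, List.mem_cons_of_mem _ ha⟩

/-- Backward direction of "(x, e1) already paired": every seen `y` is paired
with the unseen `e1`. -/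
theorem pbAux_mem_snd {L : List String} {e1 : String} (he1L : e1 ∈ L) :
    ∀ (ts pre : List String) {y}, y ∈ ts → e1 ∉ pre → e1 ∉ ts →
      [y, e1] ∈ pbAux L pre ts := by
  intro ts
  induction ts with
  | nil => intro pre y h; simp at h
  | cons t ts ih =>
    intro pre y hy hpre hts
    rw [pbAux]
    rcases List.mem_cons.mp hy with rfl | hy
    · refine List.mem_append_left _ (List.mem_map.mpr ⟨e1, ?_, rfl⟩)
      rw [mem_dd]
      refine ⟨he1L, ?_⟩
      simp only [List.mem_append, List.mem_singleton]
      rintro (h | h)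
      · exact hpre h
      · exact hts (h ▸ List.mem_cons_self ..)
    · refine List.mem_append_right _ (ih _ hy ?_ (fun h => hts (List.mem_cons_of_mem _ h)))
      simp only [List.mem_append, List.mem_singleton]
      rintro (h | h)
      · exact hpre h
      · exact hts (h ▸ List.mem_cons_self ..)

/-- For a seen `e1` every other value `x` of `L` is already paired one way or
the other. -/
theorem pbAux_pair_present {L : List String} {e1 x : String}
    (he1L : e1 ∈ L) (hxL : x ∈ L) (hne : x ≠ e1) :
    ∀ (ts pre : List String), e1 ∈ ts → x ∉ pre → (∀ z ∈ ts, z ∉ pre) →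
      ts.Nodup → [e1, x] ∈ pbAux L pre ts ∨ [x, e1] ∈ pbAux L pre ts := by
  intro ts
  induction ts with
  | nil => intro pre h; simp at h
  | cons t ts ih =>
    intro pre he1 hxpre hdisj hnd
    rw [pbAux]
    have htts : t ∉ ts := (List.nodup_cons.mp hnd).1
    rcases List.mem_cons.mp he1 with rfl | he1
    · left
      refine List.mem_append_left _ (List.mem_map.mpr ⟨x, ?_, rfl⟩)
      rw [mem_dd]
      refine ⟨hxL, ?_⟩
      simp only [List.mem_append, List.mem_singleton]
      rintro (h | h)
      · exact hxpre h
      · exact hne h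
    · have he1t : e1 ≠ t := fun h => htts (h ▸ he1)
      by_cases hxt : x = t
      · right
        subst hxt
        refine List.mem_append_left _ (List.mem_map.mpr ⟨e1, ?_, rfl⟩)
        rw [mem_dd]
        refine ⟨he1L, ?_⟩
        simp only [List.mem_append, List.mem_singleton]
        rintro (h | h)
        · exact hdisj e1 (by simp [he1]) h
        · exact he1t h
      · rcases ih (pre ++ [t]) he1 (by simp [hxpre, hxt])
          (fun z hz => by
            simp only [List.mem_append, List.mem_singleton]
            rintro (h | h)
            · exact hdisj z (List.mem_cons_of_mem _ hz) h
            · exact htts (h ▸ hz))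
          (List.nodup_cons.mp hnd).2 with h | h
        · exact Or.inl (List.mem_append_right _ h)
        · exact Or.inr (List.mem_append_right _ h)

/-- snoc law for `pbAux`. -/
theorem pbAux_snoc {L : List String} : ∀ (ts pre : List String) (t : String),
    pbAux L pre (ts ++ [t]) =
      pbAux L pre ts ++ (dd (pre ++ ts ++ [t]) L).map (fun b => [t, b]) := by
  intro ts
  induction ts with
  | nil => intro pre t; simp [pbAux]
  | cons s ts ih =>
    intro pre t
    rw [List.cons_append, pbAux, pbAux, ih, List.append_assoc]
    simp [List.append_assoc]

/-- `pairsB` of a dedup chain agrees with `pbAux`. -/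
theorem pairsB_eq_pbAux {L : List String} : ∀ (ts pre : List String),
    dd pre L = ts → pairsB ts = pbAux L pre ts := by
  intro ts
  induction ts with
  | nil => intro pre _; rfl
  | cons t ts ih =>
    intro pre h
    rw [pairsB, pbAux, dd_cons L pre h, ih _ (dd_cons L pre h)]


/-- If every value of `M` is already paired with `e1` one way or the other,
A's inner loop is a no-op. -/
theorem inner_noop {e1 : String} : ∀ (M : List String) (combos : List (List String)),
    (∀ y ∈ M, y ≠ e1 → [e1, y] ∈ combos ∨ [y, e1] ∈ combos) →
    M.foldl (comboInnerStep e1) combos = combos := by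
  intro M
  induction M with
  | nil => intro combos _; rfl
  | cons x M ih =>
    intro combos h
    rw [List.foldl_cons]
    by_cases hx : e1 = x
    · rw [comboInnerStep, if_pos hx]
      exact ih _ fun y hy => h y (List.mem_cons_of_mem _ hy)
    · have hpres := h x (List.mem_cons_self ..) (fun hc => hx hc.symm)
      have : comboInnerStep e1 combos x = combos := by
        rw [comboInnerStep, if_neg hx]
        simp only [List.reverse_cons, List.reverse_nil, List.nil_append,
          List.cons_append]
        rcases hpres with h' | h' <;> simp [h']
      rw [this]
      exact ih _ fun y hy => h y (List.mem_cons_of_mem _ hy)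

/-- A's inner loop for a fresh `e1`: it appends `[e1, b]` for each new distinct
value `b` of `M` in order, on top of the block `S` it has already appended. -/
theorem inner_new {e1 : String} {T : List String} {base : List (List String)}
    (h1 : ∀ y, [e1, y] ∉ base) (h2 : ∀ y, [y, e1] ∈ base ↔ y ∈ T)
    (h3 : e1 ∉ T) :
    ∀ (M S : List String),
      M.foldl (comboInnerStep e1) (base ++ S.map (fun b => [e1, b])) =
        base ++ (S ++ dd (T ++ e1 :: S) M).map (fun b => [e1, b]) := by
  intro M
  induction M with
  | nil => intro S; simp [dd]
  | cons x M ih =>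
    intro S
    rw [List.foldl_cons]
    by_cases hx : e1 = x
    · rw [comboInnerStep, if_pos hx, dd, if_pos (by simp [hx])]
      exact ih S
    · have hmem1 : [e1, x] ∈ base ++ S.map (fun b => [e1, b]) ↔ x ∈ S := by
        simp only [List.mem_append, List.mem_map]
        constructor
        · rintro (h | ⟨b, hb, he⟩)
          · exact absurd h (h1 x)
          · obtain ⟨-, rfl⟩ : e1 = e1 ∧ x = b := by
              simpa using he.symm
            exact hb
        · intro h; exact Or.inr ⟨x, h, rfl⟩
      have hmem2 : [x, e1] ∈ base ++ S.map (fun b => [e1, b]) ↔ x ∈ T := by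
        simp only [List.mem_append, List.mem_map]
        constructor
        · rintro (h | ⟨b, hb, he⟩)
          · exact (h2 x).mp h
          · obtain ⟨rfl, -⟩ : x = e1 ∧ e1 = b := by simpa using he.symm
            exact absurd rfl hx
        · intro h; exact Or.inl ((h2 x).mpr h)
      by_cases hskip : x ∈ S ∨ x ∈ T
      · have : comboInnerStep e1 (base ++ S.map (fun b => [e1, b])) x =
            base ++ S.map (fun b => [e1, b]) := by
          rw [comboInnerStep, if_neg hx]
          simp only [List.reverse_cons, List.reverse_nil, List.nil_append,
            List.cons_append]
          rcases hskip with h | h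
          · simp [hmem1.mpr h]
          · simp [hmem2.mpr h]
        rw [this, dd, if_pos (by
          simp only [List.mem_append, List.mem_cons]
          rcases hskip with h | h
          · exact Or.inr (Or.inr h)
          · exact Or.inl h)]
        exact ih S
      · rw [not_or] at hskip
        have : comboInnerStep e1 (base ++ S.map (fun b => [e1, b])) x =
            base ++ (S ++ [x]).map (fun b => [e1, b]) := by
          rw [comboInnerStep, if_neg hx]
          simp only [List.reverse_cons, List.reverse_nil, List.nil_append,
            List.cons_append]
          rw [if_pos ⟨by rw [hmem1]; exact hskip.1, by rw [hmem2]; exact hskip.2⟩]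
          simp
        rw [this, dd, if_neg (by
          simp only [List.mem_append, List.mem_cons]
          rintro (h | h | h)
          · exact hskip.2 h
          · exact hx h.symm
          · exact hskip.1 h)]
        rw [ih (S ++ [x])]
        have hseen : T ++ e1 :: (S ++ [x]) = (T ++ e1 :: S) ++ [x] := by simp
        rw [hseen]
        simp

/-- Outer loop invariant: having processed the distinct values `seen`, the
accumulator is `pbAux L [] seen`, and processing `M` extends `seen` by
`dd seen M`. -/
theorem outer_fold {L : List String} : ∀ (M seen : List String),
    (∀ y ∈ M, y ∈ L) → (∀ y ∈ seen, y ∈ L) → seen.Nodup →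
    M.foldl (fun c e1 => L.foldl (comboInnerStep e1) c) (pbAux L [] seen) =
      pbAux L [] (seen ++ dd seen M) := by
  intro M
  induction M with
  | nil => intro seen _ _ _; simp [dd]
  | cons x M ih =>
    intro seen hM hseen hnd
    have hxL : x ∈ L := hM x (List.mem_cons_self ..)
    rw [List.foldl_cons]
    by_cases hx : x ∈ seen
    · rw [inner_noop L _ (fun y hyL hne =>
        pbAux_pair_present hxL hyL hne seen [] hx (by simp) (by simp) hnd)]
      rw [dd, if_pos hx]
      exact ih seen (fun y hy => hM y (List.mem_cons_of_mem _ hy)) hseen hnd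
    · have h1 : ∀ y, [x, y] ∉ pbAux L [] seen := by
        intro y hc
        obtain ⟨a, b, he, ha⟩ := mem_pbAux_fst seen [] hc
        obtain ⟨rfl, -⟩ : a = x ∧ b = y := by simpa using he.symm
        exact hx ha
      have h2 : ∀ y, [y, x] ∈ pbAux L [] seen ↔ y ∈ seen := by
        intro y
        constructor
        · intro hc
          obtain ⟨a, b, he, ha⟩ := mem_pbAux_fst seen [] hc
          obtain ⟨rfl, -⟩ : a = y ∧ b = x := by simpa using he.symm
          exact ha
        · intro hy
          exact pbAux_mem_snd hxL seen [] hy (by simp) hx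
      have hstep := inner_new h1 h2 hx L []
      simp only [List.map_nil, List.append_nil, List.nil_append] at hstep
      rw [hstep]
      have hdd : dd (seen ++ x :: []) L = dd (seen ++ [x]) L := rfl
      have hsnoc := pbAux_snoc (L := L) seen [] x
      simp only [List.nil_append] at hsnoc
      rw [hdd, ← hsnoc]
      have hnd' : (seen ++ [x]).Nodup :=
        List.Nodup.append hnd (List.nodup_singleton x)
          (List.disjoint_singleton.mpr hx)
      have := ih (seen ++ [x])
        (fun y hy => hM y (List.mem_cons_of_mem _ hy))
        (fun y hy => by
          rcases List.mem_append.mp hy with h | h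
          · exact hseen y h
          · simpa using (List.mem_singleton.mp h) ▸ hxL)
        hnd'
      rw [this, dd, if_neg hx]
      simp

-- ===== VERDICT (by name: the statement is the Claim_ definition above) =====
theorem combo_grid_spec : Claim_equal_combo_grid := by
  intro L _
  simp only [Spec_combo_grid, combo_grid, combo_grid_alt]
  have h := outer_fold (L := L) L [] (fun y hy => hy) (by simp) List.nodup_nil
  simp only [pbAux, List.nil_append] at h
  rw [h, foldl_distinctStep_eq_dd, List.nil_append,
    pairsB_eq_pbAux (dd [] L) [] rfl]
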